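-- pv_equiv track=rewrite | github.com/becoop10/totes-data-project | star_schema/src/utils/format_purchase_facts.py | format_purchase
-- ===== SOURCE A (Python) =====
-- def format_purchase(raw_purchase):
--     formatted_purchase = []
--
--     for purchase in raw_purchase:
--         new_details = {}
--         for key in purchase:
--             if key == "created_at":
--                 new_details['created_date'] = purchase['created_at'].split(' ')[0]
--                 new_details['created_time'] = purchase['created_at'].split(' ')[1]
--             elif key == "last_updated":
--                 new_details['last_updated_date'] = purchase['last_updated'].split(' ')[0]
--                 new_details['last_updated_time'] = purchase['last_updated'].split(' ')[1]
--             else: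
--                 new_details[key]=purchase[key]
--         formatted_purchase.append(new_details)
--
--
--     return formatted_purchase
-- ===== SOURCE B (Python) =====
-- SPLITS = {
--     "created_at": ("created_date", "created_time"),
--     "last_updated": ("last_updated_date", "last_updated_time"),
-- }
--
--
-- def format_purchase(raw_purchase):
--     result = []
--     for purchase in raw_purchase:
--         items = list(purchase.items())
--         for old_key, (date_key, time_key) in SPLITS.items():
--             for i, (key, value) in enumerate(items):
--                 if key == old_key:
--                     parts = value.split(' ')
--                     items[i:i + 1] = [(date_key, parts[0]), (time_key, parts[1])]
--                     break
--         result.append(dict(items))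
--     return result
-- ===== Notes on version B (the rewrite author's own statement) =====
-- stated objective: alternative
-- what changed: Instead of A's per-key branching loop that rebuilds each record into a fresh dict with repeated purchase[key] lookups and double splits, B copies the record's item list wholesale and, driven by a SPLITS table, locates each datetime key's first occurrence and splices its date/time pair into the list in place, building the dict once at the end.
import Mathlib
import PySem

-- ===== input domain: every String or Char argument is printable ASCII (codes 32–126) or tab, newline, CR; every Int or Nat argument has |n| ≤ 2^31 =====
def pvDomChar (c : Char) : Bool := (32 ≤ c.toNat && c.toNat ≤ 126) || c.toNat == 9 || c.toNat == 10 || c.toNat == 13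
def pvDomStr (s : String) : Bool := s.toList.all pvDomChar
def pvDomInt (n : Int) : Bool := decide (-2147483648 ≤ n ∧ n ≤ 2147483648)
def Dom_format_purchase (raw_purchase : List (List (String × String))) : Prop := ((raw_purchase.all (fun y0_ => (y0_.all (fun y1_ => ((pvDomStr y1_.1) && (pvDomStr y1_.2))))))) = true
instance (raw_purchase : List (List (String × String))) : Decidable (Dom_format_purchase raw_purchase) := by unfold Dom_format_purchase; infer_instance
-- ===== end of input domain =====

-- B replaces A's per-key branching rebuild into a fresh dict by search-and-splice: copy the
-- record's item list wholesale, replace each datetime key's entry in place by its two split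
-- fields, and build the dict once (objective: alternative decomposition, same cost).

-- ===== PORT A =====
-- literal port: inner loop over the dict's keys, branching per key, inserting into new_details;
-- purchase['created_at'] is the dict lookup; .split(' ')[i] is split? + pyGet? (the getD "" arm is
-- only reached outside Pre_, where Python raises IndexError).
def format_purchase (raw_purchase : List (List (String × String))) : List (List (String × String)) :=
  raw_purchase.foldl
    (fun formatted purchase =>
      let pd : PySem.Dict String String := PySem.Dict.mk purchase
      let new_details :=
        purchase.foldl
          (fun (nd : PySem.Dict String String) kv =>
            let key := kv.1
            if key == "created_at" then
              let nd := nd.insert "created_date"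
                ((PySem.List.pyGet? (((PySem.Str.split? (pd.getD "created_at" "") " ").getD [])) 0).getD "")
              nd.insert "created_time"
                ((PySem.List.pyGet? (((PySem.Str.split? (pd.getD "created_at" "") " ").getD [])) 1).getD "")
            else if key == "last_updated" then
              let nd := nd.insert "last_updated_date"
                ((PySem.List.pyGet? (((PySem.Str.split? (pd.getD "last_updated" "") " ").getD [])) 0).getD "")
              nd.insert "last_updated_time"
                ((PySem.List.pyGet? (((PySem.Str.split? (pd.getD "last_updated" "") " ").getD [])) 1).getD "")
            else
              nd.insert key (pd.getD key ""))
          PySem.Dict.empty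
      formatted ++ [new_details.items])
    []

-- ===== PORT B =====
-- literal port of Source B. The inner 'for i, (key, value) in enumerate(items): if key == old_key:
-- items[i:i+1] = [...]; break' is exactly "replace the first pair whose key is old_key by its two
-- split fields", transcribed as this first-match recursion:
def pvSplice (old_key date_key time_key : String) :
    List (String × String) → List (String × String)
  | [] => []
  | kv :: rest =>
    if kv.1 == old_key then
      let parts := (PySem.Str.split? kv.2 " ").getD []
      (date_key, (PySem.List.pyGet? parts 0).getD "") ::
      (time_key, (PySem.List.pyGet? parts 1).getD "") :: rest
    else kv :: pvSplice old_key date_key time_key rest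

-- the outer 'for old_key, (date_key, time_key) in SPLITS.items()' loop, unrolled over the
-- two-entry literal SPLITS table; dict(items) is Dict.ofList.
def format_purchase_alt (raw_purchase : List (List (String × String))) : List (List (String × String)) :=
  raw_purchase.foldl
    (fun result purchase =>
      let items := purchase
      let items := pvSplice "created_at" "created_date" "created_time" items
      let items := pvSplice "last_updated" "last_updated_date" "last_updated_time" items
      result ++ [(PySem.Dict.ofList items).items])
    []

-- ===== PRECONDITION & SPEC =====
-- Pre_ excludes (a) association lists with duplicate keys inside a record, which do not represent a
-- Python dict (A's input type), and (b) records whose created_at/last_updated value contains no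
-- space, on which Python A raises IndexError at .split(' ')[1].
def Pre_format_purchase (raw_purchase : List (List (String × String))) : Prop :=
  ∀ rec ∈ raw_purchase, (rec.map Prod.fst).Nodup ∧
    ∀ kv ∈ rec, (kv.1 = "created_at" ∨ kv.1 = "last_updated") → ' ' ∈ kv.2.toList
instance (raw_purchase : List (List (String × String))) : Decidable (Pre_format_purchase raw_purchase) := by
  unfold Pre_format_purchase; infer_instance
def pvWitness_format_purchase : (List (List (String × String))) :=
  [[("created_at", "2022-11-03 14:20:52"), ("purchase_order_id", "1"), ("last_updated", "2022-11-03 14:20:52")],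
   [("staff_id", "19")]]

def Spec_format_purchase (raw_purchase : List (List (String × String))) (out : List (List (String × String))) : Prop := out = format_purchase_alt raw_purchase
instance (raw_purchase : List (List (String × String))) (out : List (List (String × String))) : Decidable (Spec_format_purchase raw_purchase out) := by unfold Spec_format_purchase; infer_instance

-- ===== CLAIM (what is proved, stated in full; the proofs are below) =====
def Claim_equal_format_purchase : Prop := ∀ (raw_purchase : List (List (String × String))), Dom_format_purchase raw_purchase → Pre_format_purchase raw_purchase → Spec_format_purchase raw_purchase (format_purchase raw_purchase)

-- ===== LEMMAS AND PROOFS =====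

-- proof-side canonical form: each pair, expanded in place
def pvExpand (kv : String × String) : List (String × String) :=
  if kv.1 == "created_at" then
    let parts := (PySem.Str.split? kv.2 " ").getD []
    [("created_date", (PySem.List.pyGet? parts 0).getD ""),
     ("created_time", (PySem.List.pyGet? parts 1).getD "")]
  else if kv.1 == "last_updated" then
    let parts := (PySem.Str.split? kv.2 " ").getD []
    [("last_updated_date", (PySem.List.pyGet? parts 0).getD ""),
     ("last_updated_time", (PySem.List.pyGet? parts 1).getD "")]
  else
    [kv]

-- A's inner step at kv equals folding the inserts of pvExpand kv, provided the dict lookup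
-- of the two special keys gives kv's own value.
theorem pv_inner_eq (pd : PySem.Dict String String)
    (l : List (String × String)) (d : PySem.Dict String String)
    (h : ∀ kv ∈ l, pd.getD kv.1 "" = kv.2) :
    l.foldl
      (fun (nd : PySem.Dict String String) kv =>
        let key := kv.1
        if key == "created_at" then
          let nd := nd.insert "created_date"
            ((PySem.List.pyGet? (((PySem.Str.split? (pd.getD "created_at" "") " ").getD [])) 0).getD "")
          nd.insert "created_time"
            ((PySem.List.pyGet? (((PySem.Str.split? (pd.getD "created_at" "") " ").getD [])) 1).getD "")
        else if key == "last_updated" then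
          let nd := nd.insert "last_updated_date"
            ((PySem.List.pyGet? (((PySem.Str.split? (pd.getD "last_updated" "") " ").getD [])) 0).getD "")
          nd.insert "last_updated_time"
            ((PySem.List.pyGet? (((PySem.Str.split? (pd.getD "last_updated" "") " ").getD [])) 1).getD "")
        else
          nd.insert key (pd.getD key "")) d
    = (l.flatMap pvExpand).foldl
        (fun (d : PySem.Dict String String) kv => d.insert kv.1 kv.2) d := by
  induction l generalizing d with
  | nil => rfl
  | cons kv rest ih =>
    have hkv := h kv (List.mem_cons_self)
    have hrest : ∀ kv' ∈ rest, pd.getD kv'.1 "" = kv'.2 :=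
      fun kv' hm => h kv' (List.mem_cons_of_mem _ hm)
    simp only [List.foldl_cons, List.flatMap_cons, List.foldl_append]
    rw [ih _ hrest]
    congr 1
    by_cases h1 : kv.1 = "created_at"
    · rw [h1] at hkv
      simp [pvExpand, h1, hkv]
    · by_cases h2 : kv.1 = "last_updated"
      · rw [h2] at hkv
        simp [pvExpand, h2, hkv]
      · simp [pvExpand, h1, h2, hkv]

-- a dict lookup in a record with distinct keys returns the pair's own value
theorem pv_lookup (rec : List (String × String)) (hnd : (rec.map Prod.fst).Nodup)
    (kv : String × String) (hm : kv ∈ rec) :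
    (PySem.Dict.mk rec).getD kv.1 "" = kv.2 := by
  exact PySem.Dict.getD_of_mem_items (PySem.Dict.mk rec) (by simpa using hm) (by simpa [PySem.Dict.keys] using hnd) ""

-- expansion is the identity on a list without the two special keys
theorem pv_expand_id (l : List (String × String))
    (h : ∀ kv ∈ l, kv.1 ≠ "created_at" ∧ kv.1 ≠ "last_updated") :
    l.flatMap pvExpand = l := by
  induction l with
  | nil => rfl
  | cons kv rest ih =>
    have hkv := h kv (List.mem_cons_self)
    have hrest := fun kv' hm => h kv' (List.mem_cons_of_mem _ hm)
    simp [pvExpand, hkv.1, hkv.2, ih hrest]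

-- splicing last_updated on a record with distinct keys and no created_at = full expansion
theorem pv_splice_lu (l : List (String × String))
    (hnd : (l.map Prod.fst).Nodup) (hca : ∀ kv ∈ l, kv.1 ≠ "created_at") :
    pvSplice "last_updated" "last_updated_date" "last_updated_time" l = l.flatMap pvExpand := by
  induction l with
  | nil => rfl
  | cons kv rest ih =>
    have hndr : (rest.map Prod.fst).Nodup := (List.nodup_cons.mp hnd).2
    have hkvnot : kv.1 ∉ rest.map Prod.fst := (List.nodup_cons.mp hnd).1
    have hcar := fun kv' hm => hca kv' (List.mem_cons_of_mem _ hm)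
    by_cases h2 : kv.1 = "last_updated"
    · have hrest : ∀ kv' ∈ rest, kv'.1 ≠ "created_at" ∧ kv'.1 ≠ "last_updated" := by
        intro kv' hm
        refine ⟨hcar kv' hm, fun he => hkvnot ?_⟩
        rw [h2, ← he]; exact List.mem_map_of_mem hm
      simp [pvSplice, h2, pvExpand, pv_expand_id rest hrest]
    · simp [pvSplice, h2, pvExpand, hca kv (List.mem_cons_self), ih hndr hcar]

-- splicing created_at on a record with distinct keys and no last_updated = full expansion
theorem pv_splice_ca (l : List (String × String))
    (hnd : (l.map Prod.fst).Nodup) (hlu : ∀ kv ∈ l, kv.1 ≠ "last_updated") :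
    pvSplice "created_at" "created_date" "created_time" l = l.flatMap pvExpand := by
  induction l with
  | nil => rfl
  | cons kv rest ih =>
    have hndr : (rest.map Prod.fst).Nodup := (List.nodup_cons.mp hnd).2
    have hkvnot : kv.1 ∉ rest.map Prod.fst := (List.nodup_cons.mp hnd).1
    have hlur := fun kv' hm => hlu kv' (List.mem_cons_of_mem _ hm)
    by_cases h1 : kv.1 = "created_at"
    · have hrest : ∀ kv' ∈ rest, kv'.1 ≠ "created_at" ∧ kv'.1 ≠ "last_updated" := by
        intro kv' hm
        refine ⟨fun he => hkvnot ?_, hlur kv' hm⟩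
        rw [h1, ← he]; exact List.mem_map_of_mem hm
      simp [pvSplice, h1, pvExpand, pv_expand_id rest hrest]
    · simp [pvSplice, h1, pvExpand, hlu kv (List.mem_cons_self), ih hndr hlur]

-- the two staged splices compute the full expansion on a record with distinct keys
theorem pv_splice2 (l : List (String × String)) (hnd : (l.map Prod.fst).Nodup) :
    pvSplice "last_updated" "last_updated_date" "last_updated_time"
      (pvSplice "created_at" "created_date" "created_time" l)
    = l.flatMap pvExpand := by
  induction l with
  | nil => rfl
  | cons kv rest ih =>
    have hndr : (rest.map Prod.fst).Nodup := (List.nodup_cons.mp hnd).2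
    have hkvnot : kv.1 ∉ rest.map Prod.fst := (List.nodup_cons.mp hnd).1
    by_cases h1 : kv.1 = "created_at"
    · have hrest : ∀ kv' ∈ rest, kv'.1 ≠ "created_at" := by
        intro kv' hm he
        exact hkvnot (by rw [h1, ← he]; exact List.mem_map_of_mem hm)
      have hr := pv_splice_lu rest hndr hrest
      simp [pvSplice, h1, pvExpand, hr]
    · by_cases h2 : kv.1 = "last_updated"
      · have hrest : ∀ kv' ∈ rest, kv'.1 ≠ "last_updated" := by
          intro kv' hm he
          exact hkvnot (by rw [h2, ← he]; exact List.mem_map_of_mem hm)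
        have hr := pv_splice_ca rest hndr hrest
        simp [pvSplice, h2, pvExpand, hr]
      · simp only [pvSplice, beq_iff_eq, h1, h2, if_false, List.flatMap_cons]
        rw [ih hndr]
        simp [pvExpand, h1, h2]

-- ===== VERDICT (by name: the statement is the Claim_ definition above) =====
theorem format_purchase_spec : Claim_equal_format_purchase := by
  intro raw _ hpre
  unfold Spec_format_purchase format_purchase format_purchase_alt
  rw [PySem.List.foldl_append_singleton_eq_map, PySem.List.foldl_append_singleton_eq_map]
  apply List.map_congr_left
  intro purchase hmem
  have hnd := (hpre purchase hmem).1
  have hlk : ∀ kv ∈ purchase, (PySem.Dict.mk purchase).getD kv.1 "" = kv.2 :=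
    fun kv hkv => pv_lookup purchase hnd kv hkv
  simp only
  rw [pv_inner_eq _ _ _ hlk, pv_splice2 purchase hnd]
  rfl
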